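-- pv_equiv track=rewrite | github.com/UPstartDeveloper/SPD-2-3-Debugging-Lab | exercise-2.py | contains_3_consecutive
-- ===== SOURCE A (Python) =====
-- def contains_3_consecutive(list_of_nums):
--     """Return True if the list contains 3 consecutive numbers each increasing by 1."""
--     for i in range(len(list_of_nums) - 2):
--         if (list_of_nums[i+1] == list_of_nums[i] + 1 and
--             list_of_nums[i+2] == list_of_nums[i] + 2):
--             return True
--     else:
--         return False
--
--     return False
-- ===== SOURCE B (Python) =====
-- def contains_3_consecutive(list_of_nums):
--     """Return True if the list contains 3 consecutive numbers each increasing by 1."""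
--     run = 1
--     for prev, cur in zip(list_of_nums, list_of_nums[1:]):
--         run = run + 1 if cur == prev + 1 else 1
--         if run >= 3:
--             return True
--     return False
-- ===== Notes on version B (the rewrite author's own statement) =====
-- stated objective: alternative
-- what changed: Replaces A's fixed-index triple-window scan with a single pass over adjacent pairs that maintains a run-length counter of consecutive +1 steps, returning True as soon as the run reaches 3.
import Mathlib
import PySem

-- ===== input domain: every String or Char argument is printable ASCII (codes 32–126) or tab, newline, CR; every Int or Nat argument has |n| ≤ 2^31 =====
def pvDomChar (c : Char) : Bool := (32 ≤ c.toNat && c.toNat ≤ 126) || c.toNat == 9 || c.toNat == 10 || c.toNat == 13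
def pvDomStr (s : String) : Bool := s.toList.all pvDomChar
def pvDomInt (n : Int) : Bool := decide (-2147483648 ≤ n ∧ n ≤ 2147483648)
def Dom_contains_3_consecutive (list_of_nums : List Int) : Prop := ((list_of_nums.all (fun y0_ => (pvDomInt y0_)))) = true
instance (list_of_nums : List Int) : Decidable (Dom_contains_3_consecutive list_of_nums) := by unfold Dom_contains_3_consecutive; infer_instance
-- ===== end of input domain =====

-- B replaces A's fixed-index triple-window scan with a single pass over adjacent
-- pairs maintaining a run-length counter (objective: alternative algorithm, same cost).


-- ===== PORT A =====
-- 'for i in range(len(list_of_nums) - 2)': counter i running up to n := len - 2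
-- (Nat subtraction matches Python: range over a non-positive bound is empty).
-- The two indexed reads use getD; every index reached is in range, so this is exact.
def aLoop (xs : List Int) (n : Nat) (i : Nat) : Bool :=
  if _h : i < n then
    if xs.getD (i+1) 0 = xs.getD i 0 + 1 ∧ xs.getD (i+2) 0 = xs.getD i 0 + 2 then
      true
    else
      aLoop xs n (i+1)
  else
    false
termination_by n - i

def contains_3_consecutive (list_of_nums : List Int) : Bool :=
  aLoop list_of_nums (list_of_nums.length - 2) 0

-- ===== PORT B =====
-- single pass over adjacent pairs (prev, cur) carrying the run-length counter
def bLoop (prev : Int) (run : Nat) : List Int → Bool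
  | [] => false
  | cur :: rest =>
    let run' := if cur = prev + 1 then run + 1 else 1
    if 3 ≤ run' then true else bLoop cur run' rest

def contains_3_consecutive_alt (list_of_nums : List Int) : Bool :=
  match list_of_nums with
  | [] => false
  | x :: rest => bLoop x 1 rest

-- ===== PRECONDITION & SPEC =====
def Spec_contains_3_consecutive (list_of_nums : List Int) (out : Bool) : Prop := out = contains_3_consecutive_alt list_of_nums
instance (list_of_nums : List Int) (out : Bool) : Decidable (Spec_contains_3_consecutive list_of_nums out) := by unfold Spec_contains_3_consecutive; infer_instance

-- ===== CLAIM (what is proved, stated in full; the proofs are below) =====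
def Claim_equal_contains_3_consecutive : Prop := ∀ (list_of_nums : List Int), Dom_contains_3_consecutive list_of_nums → Spec_contains_3_consecutive list_of_nums (contains_3_consecutive list_of_nums)

-- ===== LEMMAS AND PROOFS =====

-- reference predicate: structural recursion on triples of adjacent elements
def has3 : List Int → Bool
  | a :: b :: c :: rest => (b = a + 1 && c = a + 2) || has3 (b :: c :: rest)
  | _ => false

lemma has3_short (l : List Int) (h : l.length < 3) : has3 l = false := by
  match l with
  | [] => rfl
  | [_] => rfl
  | [_, _] => rfl
  | _ :: _ :: _ :: _ => exfalso; simp at h; omega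

lemma aLoop_eq_has3 (xs : List Int) (i : Nat) :
    aLoop xs (xs.length - 2) i = has3 (xs.drop i) := by
  generalize hd : xs.length - 2 - i = d
  induction d generalizing i with
  | zero =>
    have hni : ¬ i < xs.length - 2 := by omega
    rw [aLoop, dif_neg hni, has3_short]
    simp; omega
  | succ d ih =>
    have hi : i < xs.length - 2 := by omega
    have h0 : i < xs.length := by omega
    have h1 : i + 1 < xs.length := by omega
    have h2 : i + 2 < xs.length := by omega
    have hdrop0 : xs.drop i = xs[i] :: xs.drop (i+1) := List.drop_eq_getElem_cons h0
    have hdrop1 : xs.drop (i+1) = xs[i+1] :: xs.drop (i+2) := List.drop_eq_getElem_cons h1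
    have hdrop2 : xs.drop (i+2) = xs[i+2] :: xs.drop (i+3) := List.drop_eq_getElem_cons h2
    rw [aLoop, dif_pos hi]
    rw [hdrop0, hdrop1, hdrop2, has3]
    rw [List.getD_eq_getElem xs 0 h0, List.getD_eq_getElem xs 0 h1, List.getD_eq_getElem xs 0 h2]
    by_cases hc : xs[i+1] = xs[i] + 1 ∧ xs[i+2] = xs[i] + 2
    · simp [hc.1, hc.2]
    · rw [if_neg hc]
      have := ih (i+1) (by omega)
      rw [hdrop1, hdrop2] at this
      rw [this]
      rcases Decidable.not_and_iff_not_or_not.mp hc with h | h <;> simp [h]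

lemma bLoop_eq_has3 (rest : List Int) :
    (∀ p : Int, bLoop p 1 rest = has3 (p :: rest)) ∧
    (∀ p : Int, bLoop p 2 rest = has3 ((p - 1) :: p :: rest)) := by
  induction rest with
  | nil =>
    constructor <;> intro p <;> rfl
  | cons c t ih =>
    constructor
    · intro p
      by_cases hc : c = p + 1
      · subst hc
        have lhs : bLoop p 1 ((p + 1) :: t) = bLoop (p + 1) 2 t := by simp [bLoop]
        rw [lhs, ih.2 (p + 1)]
        have hx : p + 1 - 1 = p := by omega
        rw [hx]
      · have lhs : bLoop p 1 (c :: t) = bLoop c 1 t := by simp [bLoop, hc]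
        have hr : has3 (p :: c :: t) = has3 (c :: t) := by
          cases t with
          | nil => rfl
          | cons d t' => simp [has3, hc]
        rw [lhs, hr, ih.1 c]
    · intro p
      by_cases hc : c = p + 1
      · subst hc
        have lhs : bLoop p 2 ((p + 1) :: t) = true := by simp [bLoop]
        rw [lhs]
        have h1 : p = p - 1 + 1 := by omega
        have h2 : p + 1 = p - 1 + 2 := by omega
        simp [has3, ← h1, ← h2]
      · have lhs : bLoop p 2 (c :: t) = bLoop c 1 t := by simp [bLoop, hc]
        have h2 : ¬ c = p - 1 + 2 := by omega
        have hr1 : has3 ((p - 1) :: p :: c :: t) = has3 (p :: c :: t) := by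
          simp [has3, h2]
        have hr2 : has3 (p :: c :: t) = has3 (c :: t) := by
          cases t with
          | nil => rfl
          | cons d t' => simp [has3, hc]
        rw [lhs, hr1, hr2, ih.1 c]

-- ===== VERDICT (by name: the statement is the Claim_ definition above) =====
theorem contains_3_consecutive_spec : Claim_equal_contains_3_consecutive := by
  intro xs _
  unfold Spec_contains_3_consecutive contains_3_consecutive contains_3_consecutive_alt
  rw [aLoop_eq_has3, List.drop_zero]
  match xs with
  | [] => rfl
  | x :: rest => exact ((bLoop_eq_has3 rest).1 x).symm
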